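-- pv_equiv track=rewrite | github.com/ShaneKavinda/DSA_ASS3 | Q1Task2.py | buildcompleteTree
-- ===== SOURCE A (Python) =====
-- def buildcompleteTree(sorted_sequence):
--   i = 0
--   j = len(sorted_sequence) - 1
--   k = 3
--   while ( i < j):
--     i = i + k
--     j = j - k
--     k += 1
--     if j < i:
--       break
--   start_index = i
--   result = []
--
--   def buildTree(sorted_sequence, result, initial_mid=None):
--     if not sorted_sequence:
--         return []
--     if initial_mid is None:
--       initial_mid = len(sorted_sequence) // 2
--       if initial_mid % 2 == 0 and initial_mid > 0 and len(sorted_sequence) > 4: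
--         initial_mid += 1
--     mid_index = initial_mid
--     result.append(sorted_sequence[mid_index])
--     buildTree(sorted_sequence[:mid_index], result)
--     buildTree(sorted_sequence[mid_index+1:], result)
--
--     return result
--
--   result = buildTree(sorted_sequence, result, start_index)
--
--   return result
-- ===== SOURCE B (Python) =====
-- def buildcompleteTree(sorted_sequence):
--     n = len(sorted_sequence)
--     i, j, k = 0, n - 1, 3
--     while i < j:
--         i += k
--         j -= k
--         k += 1
--         if j < i:
--             break
--     result = []
--
--     def emit(lo, hi):
--         # preorder over the segment [lo, hi), mid chosen by the length formula
--         if lo >= hi: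
--             return
--         m = (hi - lo) // 2
--         if m % 2 == 0 and m > 0 and hi - lo > 4:
--             m += 1
--         result.append(sorted_sequence[lo + m])
--         emit(lo, lo + m)
--         emit(lo + m + 1, hi)
--
--     if n:
--         result.append(sorted_sequence[i])
--         emit(0, i)
--         emit(i + 1, n)
--     return result
-- ===== Notes on version B (the rewrite author's own statement) =====
-- stated objective: faster
-- what changed: B replaces A's recursive list-slicing (each call copies its subsequence) with an index-based recursion over (lo,hi) bounds into the original list, computing the mid from the segment length; no sublists are ever materialised.
import Mathlib
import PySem

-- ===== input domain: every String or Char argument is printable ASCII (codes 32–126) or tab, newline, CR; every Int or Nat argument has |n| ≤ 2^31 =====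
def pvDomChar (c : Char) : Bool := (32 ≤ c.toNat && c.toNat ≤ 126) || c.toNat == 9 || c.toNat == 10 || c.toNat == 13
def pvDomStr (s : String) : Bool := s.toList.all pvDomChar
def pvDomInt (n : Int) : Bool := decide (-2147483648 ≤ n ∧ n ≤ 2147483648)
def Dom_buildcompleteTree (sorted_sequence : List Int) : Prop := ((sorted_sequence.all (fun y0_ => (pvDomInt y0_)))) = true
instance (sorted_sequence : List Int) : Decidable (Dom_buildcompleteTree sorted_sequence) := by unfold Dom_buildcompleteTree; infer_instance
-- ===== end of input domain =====

-- B replaces A's recursive list-slicing with an index-based recursion over (lo,hi)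
-- bounds into the original list (objective: faster — no sublist is ever materialised).

-- ===== PORT A =====
-- the start-index while-loop (identical in both Python sources); Python's k is
-- encoded as t + 3 (k starts at 3 and goes up by 1); fuel only makes the loop
-- total (each iteration shrinks j - i by at least 6, so fuel = length + 1 is
-- never exhausted)
def pvStartLoop (fuel : Nat) (i j : Int) (t : Nat) : Int :=
  match fuel with
  | 0 => i
  | fuel + 1 =>
    if i < j then
      let i' := i + ((t : Int) + 3)
      let j' := j - ((t : Int) + 3)
      if j' < i' then i' else pvStartLoop fuel i' j' (t + 1)
    else i

-- inner buildTree of A: appends s[mid], recurses on the slices s[:mid], s[mid+1:].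
-- mid is kept as Nat: Python's start_index is provably ≥ 0 (starts at 0, only grows)
-- and the recursive mids are len//2 (+1), so Nat take/drop are exact for the slices.
-- s[mid] is ported as getD mid 0: inside Pre_ the index is always in range (Python
-- raises IndexError exactly on the inputs Pre_ excludes). fuel = length + 2 is
-- never exhausted (every recursive level shrinks the list).
def buildTreeA (fuel : Nat) (s : List Int) (res : List Int) (initialMid : Option Nat) : List Int :=
  match fuel with
  | 0 => res
  | fuel + 1 =>
    if s.isEmpty then res
    else
      let mid : Nat :=
        match initialMid with
        | some m => m
        | none =>
          let m := s.length / 2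
          if m % 2 = 0 ∧ 0 < m ∧ 4 < s.length then m + 1 else m
      let res1 := res ++ [s.getD mid 0]
      let res2 := buildTreeA fuel (s.take mid) res1 none
      buildTreeA fuel (s.drop (mid + 1)) res2 none

def buildcompleteTree (sorted_sequence : List Int) : List Int :=
  let start := pvStartLoop (sorted_sequence.length + 1) 0 ((sorted_sequence.length : Int) - 1) 0
  buildTreeA (sorted_sequence.length + 2) sorted_sequence [] (some start.toNat)

-- ===== PORT B =====
-- B's emit: preorder over the index segment [lo, hi) of s, mid from the length
-- formula; fuel = length + 1 only makes it total (segments shrink every level)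
def emitAlt (fuel : Nat) (s : List Int) (lo hi : Nat) (res : List Int) : List Int :=
  match fuel with
  | 0 => res
  | fuel + 1 =>
    if lo ≥ hi then res
    else
      let m0 := (hi - lo) / 2
      let m := if m0 % 2 = 0 ∧ 0 < m0 ∧ 4 < hi - lo then m0 + 1 else m0
      let res1 := res ++ [s.getD (lo + m) 0]
      let res2 := emitAlt fuel s lo (lo + m) res1
      emitAlt fuel s (lo + m + 1) hi res2

def buildcompleteTree_alt (sorted_sequence : List Int) : List Int :=
  let n := sorted_sequence.length
  let start := pvStartLoop (n + 1) 0 ((n : Int) - 1) 0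
  if n ≠ 0 then
    let mid := start.toNat
    emitAlt (n + 1) sorted_sequence (mid + 1) n
      (emitAlt (n + 1) sorted_sequence 0 mid [sorted_sequence.getD mid 0])
  else []

-- ===== PRECONDITION & SPEC =====
-- Python A raises IndexError exactly when the list has length 2 or 3 (the start-index
-- loop yields 3, out of range); those inputs are excluded (B's Python raises there too).
def Pre_buildcompleteTree (sorted_sequence : List Int) : Prop :=
  sorted_sequence.length ≠ 2 ∧ sorted_sequence.length ≠ 3
instance (sorted_sequence : List Int) : Decidable (Pre_buildcompleteTree sorted_sequence) := by
  unfold Pre_buildcompleteTree; infer_instance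

def pvWitness_buildcompleteTree : List Int := [1, 2, 3, 4, 5]

def Spec_buildcompleteTree (sorted_sequence : List Int) (out : List Int) : Prop := out = buildcompleteTree_alt sorted_sequence
instance (sorted_sequence : List Int) (out : List Int) : Decidable (Spec_buildcompleteTree sorted_sequence out) := by unfold Spec_buildcompleteTree; infer_instance

-- ===== CLAIM (what is proved, stated in full; the proofs are below) =====
def Claim_equal_buildcompleteTree : Prop := ∀ (sorted_sequence : List Int), Dom_buildcompleteTree sorted_sequence → Pre_buildcompleteTree sorted_sequence → Spec_buildcompleteTree sorted_sequence (buildcompleteTree sorted_sequence)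

-- ===== LEMMAS AND PROOFS =====

theorem pvStartLoop_nonneg (fuel : Nat) : ∀ (i j : Int) (t : Nat), 0 ≤ i →
    0 ≤ pvStartLoop fuel i j t := by
  induction fuel with
  | zero => intro i j t h; exact h
  | succ fuel ih =>
    intro i j t h
    rw [pvStartLoop]
    dsimp only
    split
    · split
      · omega
      · exact ih _ _ _ (by omega)
    · exact h

theorem pvStartLoop_le (fuel : Nat) : ∀ (i j : Int) (t : Nat),
    3 * (t : Int) ≤ i → 0 ≤ i → i ≤ j → 7 ≤ i + j →
    pvStartLoop fuel i j t ≤ i + j := by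
  induction fuel with
  | zero => intro i j t _ h2 h3 _; show i ≤ i + j; omega
  | succ fuel ih =>
    intro i j t h1 h2 h3 h4
    rw [pvStartLoop]
    dsimp only
    split
    · split
      · omega
      · have hrec := ih (i + ((t : Int) + 3)) (j - ((t : Int) + 3)) (t + 1)
          (by push_cast; omega) (by omega) (by omega) (by omega)
        omega
    · omega

-- the start index is a valid index whenever the list is nonempty and length ∉ {2,3}
theorem start_lt (n : Nat) (h1 : 1 ≤ n) (h2 : n ≠ 2) (h3 : n ≠ 3) :
    (pvStartLoop (n + 1) 0 ((n : Int) - 1) 0).toNat < n := by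
  rcases Nat.lt_or_ge n 8 with h | h
  · interval_cases n <;> first | omega | decide
  · have hb := pvStartLoop_le (n + 1) 0 ((n : Int) - 1) 0 (by norm_num) le_rfl
      (by omega) (by omega)
    have hn := pvStartLoop_nonneg (n + 1) 0 ((n : Int) - 1) 0 le_rfl
    omega

-- B's emit on [lo, hi) is A's buildTree on the slice, for any accumulator and
-- any sufficient fuels
theorem emitAlt_eq (s : List Int) (fe : Nat) : ∀ (fa lo hi : Nat) (res : List Int),
    hi - lo < fe → hi - lo < fa → hi ≤ s.length →
    emitAlt fe s lo hi res = buildTreeA fa ((s.drop lo).take (hi - lo)) res none := by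
  induction fe with
  | zero => intro fa lo hi res hfe _ _; omega
  | succ fe ih =>
    intro fa lo hi res hfe hfa hhi
    match fa, hfa with
    | fa + 1, hfa =>
    by_cases h : lo ≥ hi
    · rw [emitAlt, buildTreeA]
      simp [Nat.sub_eq_zero_of_le (by omega : hi ≤ lo), h]
    · have hlo : lo < hi := by omega
      rw [emitAlt]
      simp only [if_neg h]
      set m0 := (hi - lo) / 2 with hm0
      set m : Nat := if m0 % 2 = 0 ∧ 0 < m0 ∧ 4 < hi - lo then m0 + 1 else m0 with hm
      have hmlt : m < hi - lo := by rw [hm, hm0]; split <;> omega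
      have hsub : ((s.drop lo).take (hi - lo)).length = hi - lo := by
        simp only [List.length_take, List.length_drop]; omega
      rw [buildTreeA]
      have hne : ¬ ((s.drop lo).take (hi - lo)).isEmpty = true := by
        simp only [List.isEmpty_iff_length_eq_zero, hsub]; omega
      simp only [if_neg hne]
      have hmid : (let mm := ((s.drop lo).take (hi - lo)).length / 2;
          if mm % 2 = 0 ∧ 0 < mm ∧ 4 < ((s.drop lo).take (hi - lo)).length then mm + 1 else mm) = m := by
        simp only [hsub]; rw [hm, hm0]
      simp only [hmid]
      have hget : ((s.drop lo).take (hi - lo)).getD m 0 = s.getD (lo + m) 0 := by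
        simp only [List.getD_eq_getElem?_getD, List.getElem?_take, List.getElem?_drop]
        simp [if_pos hmlt]
      have htake : ((s.drop lo).take (hi - lo)).take m = (s.drop lo).take (lo + m - lo) := by
        rw [List.take_take]; congr 1; omega
      have hdrop : ((s.drop lo).take (hi - lo)).drop (m + 1)
          = (s.drop (lo + m + 1)).take (hi - (lo + m + 1)) := by
        rw [List.drop_take, List.drop_drop]
        congr 1; omega
      rw [hget, htake, hdrop,
        ← ih fa lo (lo + m) _ (by omega) (by omega) (by omega),
        ← ih fa (lo + m + 1) hi _ (by omega) (by omega) hhi]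

-- ===== VERDICT (by name: the statement is the Claim_ definition above) =====
theorem buildcompleteTree_spec : Claim_equal_buildcompleteTree := by
  intro s _ hPre
  obtain ⟨h2, h3⟩ := hPre
  unfold Spec_buildcompleteTree buildcompleteTree buildcompleteTree_alt
  by_cases hn : s.length = 0
  · have hs : s = [] := List.length_eq_zero_iff.mp hn
    subst hs
    simp [buildTreeA]
  · simp only [if_pos (by omega : s.length ≠ 0)]
    set mid := (pvStartLoop (s.length + 1) 0 ((s.length : Int) - 1) 0).toNat with hmid
    have hlt : mid < s.length := start_lt s.length (by omega) h2 h3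
    rw [buildTreeA]
    have hne : ¬ s.isEmpty = true := by
      simp only [List.isEmpty_iff_length_eq_zero]; omega
    simp only [if_neg hne]
    rw [emitAlt_eq s (s.length + 1) (s.length + 1) 0 mid _ (by omega) (by omega) (by omega),
      emitAlt_eq s (s.length + 1) (s.length + 1) (mid + 1) s.length _ (by omega) (by omega) le_rfl]
    have h1 : (s.drop 0).take (mid - 0) = s.take mid := by simp
    have h2' : (s.drop (mid + 1)).take (s.length - (mid + 1)) = s.drop (mid + 1) := by
      apply List.take_of_length_le; simp
    rw [h1, h2']
    simp
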